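-- pv_equiv track=rewrite | github.com/smart-on-fhir/chart-review | chart_review/mentions.py | calc_label_freq
-- ===== SOURCE A (Python) =====
-- def calc_label_freq(term_freq: dict) -> dict:
--     unique = dict()
--     for term in term_freq.keys():
--         for label in term_freq[term].keys():
--             if label not in unique.keys():
--                 unique[label] = dict()
--             if term not in unique[label].keys():
--                 unique[label][term] = list()
--             for note_id in term_freq[term][label]:
--                 unique[label][term].append(note_id)
--     tf = dict()
--     for label in unique.keys():
--         for term in unique[label].keys():
--             if label not in tf.keys():
--                 tf[label] = dict()
--             tf[label][term] = len(unique[label][term])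
--     return tf
-- ===== SOURCE B (Python) =====
-- def calc_label_freq(term_freq: dict) -> dict:
--     tf = dict()
--     for term, labels in term_freq.items():
--         for label, note_ids in labels.items():
--             tf.setdefault(label, dict())[term] = len(note_ids)
--     return tf
-- ===== Notes on version B (the rewrite author's own statement) =====
-- stated objective: simpler
-- what changed: Single pass over (term, label) pairs writing len(note_ids) straight into tf via setdefault, instead of A's two phases that first copy every note_id into an intermediate label->term->list structure and then re-traverse it to take lengths.
import Mathlib
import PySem

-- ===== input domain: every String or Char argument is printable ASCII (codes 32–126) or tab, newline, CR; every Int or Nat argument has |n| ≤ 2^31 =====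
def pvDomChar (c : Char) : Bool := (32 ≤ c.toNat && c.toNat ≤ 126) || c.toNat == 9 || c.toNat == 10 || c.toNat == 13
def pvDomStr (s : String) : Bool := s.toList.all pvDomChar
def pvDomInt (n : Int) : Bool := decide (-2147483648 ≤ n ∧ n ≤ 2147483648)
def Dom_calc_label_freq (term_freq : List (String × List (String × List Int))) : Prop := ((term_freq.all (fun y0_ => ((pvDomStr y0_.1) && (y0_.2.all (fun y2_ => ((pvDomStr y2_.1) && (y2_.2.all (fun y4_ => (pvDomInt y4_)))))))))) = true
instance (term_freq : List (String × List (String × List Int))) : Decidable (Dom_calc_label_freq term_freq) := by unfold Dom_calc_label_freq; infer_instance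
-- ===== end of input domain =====

-- B replaces A's two phases (accumulate every note_id into an intermediate label→term→list structure,
-- then re-traverse it taking lengths) by a single pass writing len(note_ids) straight into tf.

-- ===== PORT A =====
def calc_label_freq (term_freq : List (String × List (String × List Int))) : List (String × List (String × Int)) :=
  -- unique[label][term] = accumulated list of note_ids
  let unique : PySem.Dict String (PySem.Dict String (List Int)) :=
    term_freq.foldl (fun u tp =>
      tp.2.foldl (fun u lp =>
        let u1 := if u.contains lp.1 then u else u.insert lp.1 PySem.Dict.empty
        let inner0 := u1.getD lp.1 PySem.Dict.empty
        let inner1 := if inner0.contains tp.1 then inner0 else inner0.insert tp.1 []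
        let inner2 := lp.2.foldl (fun inn note => inn.insert tp.1 (inn.getD tp.1 [] ++ [note])) inner1
        u1.insert lp.1 inner2) u)
      PySem.Dict.empty
  -- tf[label][term] = len(unique[label][term])
  let tf : PySem.Dict String (PySem.Dict String Int) :=
    unique.items.foldl (fun t p =>
      p.2.items.foldl (fun t q =>
        let t1 := if t.contains p.1 then t else t.insert p.1 PySem.Dict.empty
        t1.insert p.1 ((t1.getD p.1 PySem.Dict.empty).insert q.1 (q.2.length : Int))) t)
      PySem.Dict.empty
  tf.items.map (fun p => (p.1, p.2.items))

-- ===== PORT B =====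
def calc_label_freq_alt (term_freq : List (String × List (String × List Int))) : List (String × List (String × Int)) :=
  (term_freq.foldl (fun t tp =>
      tp.2.foldl (fun t lp =>
        let t1 := t.setdefault lp.1 PySem.Dict.empty
        t1.insert lp.1 ((t1.getD lp.1 PySem.Dict.empty).insert tp.1 (lp.2.length : Int))) t)
    PySem.Dict.empty).items.map (fun p => (p.1, p.2.items))

-- ===== PRECONDITION & SPEC =====
-- Pre_ excludes association lists with a duplicated outer term key, or a duplicated label key inside one
-- term, because such lists do not represent a Python dict (A's parameter is a dict, whose keys are unique).
def Pre_calc_label_freq (term_freq : List (String × List (String × List Int))) : Prop :=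
  (term_freq.map Prod.fst).Nodup ∧ ∀ p ∈ term_freq, (p.2.map Prod.fst).Nodup
instance (term_freq : List (String × List (String × List Int))) : Decidable (Pre_calc_label_freq term_freq) := by unfold Pre_calc_label_freq; infer_instance

def pvWitness_calc_label_freq : (List (String × List (String × List Int))) :=
  [("fever", [("flu", [1, 2])]), ("cough", [("flu", [2]), ("cold", [3, 3])])]

def Spec_calc_label_freq (term_freq : List (String × List (String × List Int))) (out : List (String × List (String × Int))) : Prop := out = calc_label_freq_alt term_freq
instance (term_freq : List (String × List (String × List Int))) (out : List (String × List (String × Int))) : Decidable (Spec_calc_label_freq term_freq out) := by unfold Spec_calc_label_freq; infer_instance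

-- ===== CLAIM (what is proved, stated in full; the proofs are below) =====
def Claim_equal_calc_label_freq : Prop := ∀ (term_freq : List (String × List (String × List Int))), Dom_calc_label_freq term_freq → Pre_calc_label_freq term_freq → Spec_calc_label_freq term_freq (calc_label_freq term_freq)

-- ===== LEMMAS AND PROOFS =====

-- named copies of the loop bodies of the two ports (definitionally equal to the lambdas in the ports)
def pvStepA (term : String) (u : PySem.Dict String (PySem.Dict String (List Int))) (lp : String × List Int) :
    PySem.Dict String (PySem.Dict String (List Int)) :=
  let u1 := if u.contains lp.1 then u else u.insert lp.1 PySem.Dict.empty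
  let inner0 := u1.getD lp.1 PySem.Dict.empty
  let inner1 := if inner0.contains term then inner0 else inner0.insert term []
  let inner2 := lp.2.foldl (fun inn note => inn.insert term (inn.getD term [] ++ [note])) inner1
  u1.insert lp.1 inner2

def pvStepB (term : String) (t : PySem.Dict String (PySem.Dict String Int)) (lp : String × List Int) :
    PySem.Dict String (PySem.Dict String Int) :=
  let t1 := t.setdefault lp.1 PySem.Dict.empty
  t1.insert lp.1 ((t1.getD lp.1 PySem.Dict.empty).insert term (lp.2.length : Int))

def pvStep2 (lab : String) (t : PySem.Dict String (PySem.Dict String Int)) (q : String × List Int) :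
    PySem.Dict String (PySem.Dict String Int) :=
  let t1 := if t.contains lab then t else t.insert lab PySem.Dict.empty
  t1.insert lab ((t1.getD lab PySem.Dict.empty).insert q.1 (q.2.length : Int))

-- length of every note list, taken pointwise on an inner dict / on the whole structure
def pvInnerLen (d : PySem.Dict String (List Int)) : PySem.Dict String Int :=
  PySem.Dict.mk (d.items.map (fun q => (q.1, (q.2.length : Int))))
def pvMapU (u : PySem.Dict String (PySem.Dict String (List Int))) : PySem.Dict String (PySem.Dict String Int) :=
  PySem.Dict.mk (u.items.map (fun p => (p.1, pvInnerLen p.2)))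

-- invariant carried through A's first phase
def pvInv (u : PySem.Dict String (PySem.Dict String (List Int))) : Prop :=
  u.keys.Nodup ∧ ∀ lab inn, u.get? lab = some inn → inn.items ≠ [] ∧ inn.keys.Nodup

-- term does not occur in any inner dict of u
def pvFreshT (term : String) (u : PySem.Dict String (PySem.Dict String (List Int))) : Prop :=
  ∀ lab, ((u.getD lab PySem.Dict.empty).contains term) = false

theorem pv_contains_mk_map {ν ν' : Type} (f : ν → ν') (d : PySem.Dict String ν) (k : String) :
    (PySem.Dict.mk ((d.items).map (fun p => (p.1, f p.2)))).contains k = d.contains k := by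
  simp [PySem.Dict.contains, List.any_map, Function.comp_def]

theorem pv_mk_map_insert {ν ν' : Type} (f : ν → ν') (d : PySem.Dict String ν) (k : String) (v : ν) :
    PySem.Dict.mk (((d.insert k v).items).map (fun p => (p.1, f p.2)))
      = (PySem.Dict.mk ((d.items).map (fun p => (p.1, f p.2)))).insert k (f v) := by
  apply PySem.Dict.ext
  rw [PySem.Dict.items_insert, PySem.Dict.items_insert]
  rw [pv_contains_mk_map]
  by_cases h : d.contains k
  · simp only [h, if_pos, List.map_map]
    apply List.map_congr_left
    intro p _
    by_cases hp : p.1 == k <;> simp [hp, Function.comp]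
  · simp [h]

theorem pv_get?_mk_map {ν ν' : Type} (f : ν → ν') (d : PySem.Dict String ν) (k : String) :
    (PySem.Dict.mk ((d.items).map (fun p => (p.1, f p.2)))).get? k = (d.get? k).map f := by
  obtain ⟨l⟩ := d
  induction l with
  | nil => simp [PySem.Dict.get?]
  | cons p rest ih =>
    obtain ⟨a, b⟩ := p
    simp only [List.map_cons]
    rw [PySem.Dict.get?_mk_cons, PySem.Dict.get?_mk_cons]
    by_cases h : a == k <;> simp [h, ih]

theorem pv_innerLen_insert (d : PySem.Dict String (List Int)) (k : String) (v : List Int) :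
    pvInnerLen (d.insert k v) = (pvInnerLen d).insert k (v.length : Int) := by
  unfold pvInnerLen
  exact pv_mk_map_insert (fun v : List Int => (v.length : Int)) d k v

theorem pv_mapU_insert (u : PySem.Dict String (PySem.Dict String (List Int))) (k : String) (v : PySem.Dict String (List Int)) :
    pvMapU (u.insert k v) = (pvMapU u).insert k (pvInnerLen v) := pv_mk_map_insert _ u k v

theorem pv_mapU_getD (u : PySem.Dict String (PySem.Dict String (List Int))) (k : String) :
    (pvMapU u).getD k PySem.Dict.empty = pvInnerLen (u.getD k PySem.Dict.empty) := by
  rw [PySem.Dict.getD_eq_get?_getD, PySem.Dict.getD_eq_get?_getD]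
  rw [pvMapU, pv_get?_mk_map]
  cases h : u.get? k with
  | none => simp [pvInnerLen, PySem.Dict.empty]
  | some inn => simp

theorem pv_insert_items_ne_nil {ν : Type} (d : PySem.Dict String ν) (k : String) (v : ν) :
    (d.insert k v).items ≠ [] := by
  rw [PySem.Dict.items_insert]
  by_cases h : d.contains k
  · simp only [h, if_pos]
    intro hc
    simp only [List.map_eq_nil_iff] at hc
    rw [PySem.Dict.contains, hc] at h
    simp [List.any_nil] at h
  · simp [h]

theorem pv_getD_keys_nodup (u : PySem.Dict String (PySem.Dict String (List Int))) (k : String)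
    (hinv : pvInv u) : (u.getD k PySem.Dict.empty).keys.Nodup := by
  rw [PySem.Dict.getD_eq_get?_getD]
  cases h : u.get? k with
  | none => simp [PySem.Dict.keys, PySem.Dict.empty]
  | some inn => exact (hinv.2 k inn h).2

-- the append loop over notes, started from a dict where term was just set
theorem pv_append_loop (notes : List Int) (d : PySem.Dict String (List Int)) (term : String) (cur : List Int) :
    notes.foldl (fun inn note => inn.insert term (inn.getD term [] ++ [note])) (d.insert term cur)
      = d.insert term (cur ++ notes) := by
  induction notes generalizing cur with
  | nil => simp
  | cons n ns ih =>
    simp only [List.foldl_cons, PySem.Dict.getD_insert_self, PySem.Dict.insert_insert_self]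
    rw [ih]
    simp

-- A's per-label step, simplified under freshness of term
theorem pv_Astep (u : PySem.Dict String (PySem.Dict String (List Int))) (term lab : String) (notes : List Int)
    (hfresh : ((u.getD lab PySem.Dict.empty).contains term) = false) :
    pvStepA term u (lab, notes) = u.insert lab ((u.getD lab PySem.Dict.empty).insert term notes) := by
  rw [pvStepA]
  by_cases h : u.contains lab
  · simp only [h, if_pos, hfresh, Bool.false_eq_true, if_false]
    rw [pv_append_loop]
    simp
  · simp only [h, Bool.false_eq_true, if_false, PySem.Dict.getD_insert_self]
    rw [PySem.Dict.getD_of_not_contains u _ (by simpa using h)]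
    have hc : (PySem.Dict.empty : PySem.Dict String (List Int)).contains term = false := by
      simp [PySem.Dict.contains, PySem.Dict.empty]
    simp only [hc, Bool.false_eq_true, if_false]
    rw [pv_append_loop, PySem.Dict.insert_insert_self]
    simp

-- B's per-label step, simplified
theorem pv_Bstep (t : PySem.Dict String (PySem.Dict String Int)) (term lab : String) (notes : List Int) :
    pvStepB term t (lab, notes) = t.insert lab ((t.getD lab PySem.Dict.empty).insert term (notes.length : Int)) := by
  rw [pvStepB]
  by_cases h : t.contains lab
  · simp only [PySem.Dict.setdefault_of_contains t _ h]
  · simp only [PySem.Dict.setdefault_of_not_contains t _ (by simpa using h)]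
    rw [PySem.Dict.getD_insert_self, PySem.Dict.insert_insert_self,
        PySem.Dict.getD_of_not_contains t _ (by simpa using h)]

-- phase 1, inner loop over the labels of one term
theorem pv_phase1_inner (labels : List (String × List Int)) (u : PySem.Dict String (PySem.Dict String (List Int))) (term : String)
    (hnd : (labels.map Prod.fst).Nodup)
    (hfr : ∀ lab ∈ labels.map Prod.fst, ((u.getD lab PySem.Dict.empty).contains term) = false)
    (hinv : pvInv u) :
    labels.foldl (pvStepB term) (pvMapU u) = pvMapU (labels.foldl (pvStepA term) u)
    ∧ pvInv (labels.foldl (pvStepA term) u)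
    ∧ (∀ term', term' ≠ term → pvFreshT term' u → pvFreshT term' (labels.foldl (pvStepA term) u)) := by
  induction labels generalizing u with
  | nil => exact ⟨rfl, hinv, fun _ _ h => h⟩
  | cons lp rest ih =>
    obtain ⟨lab, notes⟩ := lp
    have hfr0 : ((u.getD lab PySem.Dict.empty).contains term) = false := hfr lab (by simp)
    simp only [List.foldl_cons, pv_Astep u term lab notes hfr0, pv_Bstep]
    set u' := u.insert lab ((u.getD lab PySem.Dict.empty).insert term notes) with hu'
    have hBstate : (pvMapU u).insert lab (((pvMapU u).getD lab PySem.Dict.empty).insert term (notes.length : Int))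
        = pvMapU u' := by
      rw [pv_mapU_getD, hu', pv_mapU_insert, pv_innerLen_insert]
    have hlabne : ∀ lab' ∈ rest.map Prod.fst, lab' ≠ lab := by
      intro lab' h' he
      simp only [List.map_cons, List.nodup_cons] at hnd
      exact hnd.1 (he ▸ h')
    have hfr' : ∀ lab' ∈ rest.map Prod.fst, ((u'.getD lab' PySem.Dict.empty).contains term) = false := by
      intro lab' h'
      rw [hu', PySem.Dict.getD_insert_of_ne _ _ _ (hlabne lab' h')]
      exact hfr lab' (by simp [h'])
    have hinv' : pvInv u' := by
      refine ⟨PySem.Dict.nodup_keys_insert _ _ _ hinv.1, ?_⟩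
      intro lab' inn' hget
      by_cases he : lab' = lab
      · subst he
        rw [hu', PySem.Dict.get?_insert_self] at hget
        cases hget
        exact ⟨pv_insert_items_ne_nil _ _ _,
          PySem.Dict.nodup_keys_insert _ _ _ (pv_getD_keys_nodup u lab' hinv)⟩
      · rw [hu', PySem.Dict.get?_insert_of_ne _ _ he] at hget
        exact hinv.2 lab' inn' hget
    have hfstep : ∀ term', term' ≠ term → pvFreshT term' u → pvFreshT term' u' := by
      intro term' hne hf lab'
      by_cases he : lab' = lab
      · subst he
        rw [hu', PySem.Dict.getD_insert_self, PySem.Dict.contains_insert]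
        have : (term' == term) = false := by simpa using hne
        simp [this, hf lab']
      · rw [hu', PySem.Dict.getD_insert_of_ne _ _ _ he]
        exact hf lab'
    obtain ⟨ihB, ihInv, ihF⟩ := ih u' (by simpa using hnd.of_cons) hfr' hinv'
    exact ⟨by rw [hBstate, ihB], ihInv, fun term' hne hf => ihF term' hne (hfstep term' hne hf)⟩

-- phase 1, outer loop over the terms
theorem pv_phase1 (l : List (String × List (String × List Int))) (u : PySem.Dict String (PySem.Dict String (List Int)))
    (hnd : (l.map Prod.fst).Nodup) (hin : ∀ p ∈ l, (p.2.map Prod.fst).Nodup)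
    (hfr : ∀ term ∈ l.map Prod.fst, pvFreshT term u) (hinv : pvInv u) :
    l.foldl (fun t tp => tp.2.foldl (pvStepB tp.1) t) (pvMapU u)
      = pvMapU (l.foldl (fun u tp => tp.2.foldl (pvStepA tp.1) u) u)
    ∧ pvInv (l.foldl (fun u tp => tp.2.foldl (pvStepA tp.1) u) u) := by
  induction l generalizing u with
  | nil => exact ⟨rfl, hinv⟩
  | cons tp rest ih =>
    simp only [List.foldl_cons]
    obtain ⟨hB, hInv1, hF⟩ := pv_phase1_inner tp.2 u tp.1 (hin tp (by simp))
      (fun lab _ => hfr tp.1 (by simp) lab) hinv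
    have htermne : ∀ term ∈ rest.map Prod.fst, term ≠ tp.1 := by
      intro term h' he
      simp only [List.map_cons, List.nodup_cons] at hnd
      exact hnd.1 (he ▸ h')
    obtain ⟨ihB, ihInv⟩ := ih (tp.2.foldl (pvStepA tp.1) u) (by simpa using hnd.of_cons)
      (fun p hp => hin p (List.mem_cons_of_mem _ hp))
      (fun term h' => hF term (htermne term h') (hfr term (by simp [h'])))
      hInv1
    exact ⟨by rw [hB, ihB], ihInv⟩

-- phase 2, inner loop tail: once the label is present, folding just extends its inner dict
theorem pv_phase2_step_tail (qs : List (String × List Int)) (t : PySem.Dict String (PySem.Dict String Int)) (lab : String)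
    (j : PySem.Dict String Int) :
    qs.foldl (pvStep2 lab) (t.insert lab j)
      = t.insert lab (qs.foldl (fun j q => j.insert q.1 (q.2.length : Int)) j) := by
  induction qs generalizing j with
  | nil => rfl
  | cons q qs ih =>
    simp only [List.foldl_cons, pvStep2, PySem.Dict.contains_insert, BEq.rfl, Bool.true_or, if_pos,
      PySem.Dict.getD_insert_self, PySem.Dict.insert_insert_self]
    exact ih _

-- phase 2, inner loop: with label fresh in t, it inserts (label, pvInnerLen inn)
theorem pv_phase2_step (inn : PySem.Dict String (List Int)) (t : PySem.Dict String (PySem.Dict String Int)) (lab : String)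
    (hne : inn.items ≠ []) (hnd : inn.keys.Nodup) (hfresh : t.contains lab = false) :
    inn.items.foldl (pvStep2 lab) t = t.insert lab (pvInnerLen inn) := by
  have hlen : pvInnerLen inn = inn.items.foldl (fun j q => j.insert q.1 (q.2.length : Int)) PySem.Dict.empty := by
    apply Eq.symm
    apply PySem.Dict.ext
    rw [PySem.Dict.items_foldl_insert_fresh inn.items Prod.fst (fun q => (q.2.length : Int)) PySem.Dict.empty
      (by intro a _; simp [PySem.Dict.contains, PySem.Dict.empty]) hnd]
    simp [pvInnerLen, PySem.Dict.empty]
  cases hitems : inn.items with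
  | nil => exact absurd hitems hne
  | cons q qs =>
    simp only [List.foldl_cons, pvStep2, hfresh, Bool.false_eq_true, if_false,
      PySem.Dict.getD_insert_self, PySem.Dict.insert_insert_self]
    rw [pv_phase2_step_tail]
    rw [hlen, hitems]
    rfl

-- phase 2, outer loop
theorem pv_phase2 (ps : List (String × PySem.Dict String (List Int))) (t : PySem.Dict String (PySem.Dict String Int))
    (hnd : (ps.map Prod.fst).Nodup)
    (hgood : ∀ p ∈ ps, p.2.items ≠ [] ∧ p.2.keys.Nodup)
    (hfresh : ∀ p ∈ ps, t.contains p.1 = false) :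
    ps.foldl (fun t p => p.2.items.foldl (pvStep2 p.1) t) t
      = PySem.Dict.mk (t.items ++ ps.map (fun p => (p.1, pvInnerLen p.2))) := by
  induction ps generalizing t with
  | nil => simp
  | cons p ps ih =>
    simp only [List.foldl_cons]
    rw [pv_phase2_step p.2 t p.1 (hgood p (by simp)).1 (hgood p (by simp)).2 (hfresh p (by simp))]
    rw [ih _ (by simpa using hnd.of_cons) (fun q hq => hgood q (List.mem_cons_of_mem _ hq))
      (fun q hq => by
        rw [PySem.Dict.contains_insert]
        have h1 : q.1 ≠ p.1 := by
          simp only [List.map_cons, List.nodup_cons] at hnd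
          intro he
          exact hnd.1 (he ▸ List.mem_map_of_mem hq)
        simp [h1, hfresh q (List.mem_cons_of_mem _ hq)])]
    rw [PySem.Dict.items_insert_of_not_contains t _ (hfresh p (by simp))]
    simp

-- ===== VERDICT (by name: the statement is the Claim_ definition above) =====
theorem calc_label_freq_spec : Claim_equal_calc_label_freq := by
  intro tfin _ hpre
  show calc_label_freq tfin = calc_label_freq_alt tfin
  show (let unique := tfin.foldl (fun u tp => tp.2.foldl (pvStepA tp.1) u) PySem.Dict.empty
        let tf := unique.items.foldl (fun t p => p.2.items.foldl (pvStep2 p.1) t) PySem.Dict.empty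
        tf.items.map (fun p => (p.1, p.2.items)))
      = (tfin.foldl (fun t tp => tp.2.foldl (pvStepB tp.1) t) PySem.Dict.empty).items.map (fun p => (p.1, p.2.items))
  have hempty_inv : pvInv PySem.Dict.empty := by
    constructor
    · simp [PySem.Dict.keys, PySem.Dict.empty]
    · intro lab inn h
      simp [PySem.Dict.get?, PySem.Dict.empty] at h
  have hempty_fresh : ∀ term ∈ tfin.map Prod.fst, pvFreshT term PySem.Dict.empty := by
    intro term _ lab
    simp [PySem.Dict.getD_eq_get?_getD, PySem.Dict.get?, PySem.Dict.contains, PySem.Dict.empty]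
  obtain ⟨h1, hInv⟩ := pv_phase1 tfin PySem.Dict.empty hpre.1 hpre.2 hempty_fresh hempty_inv
  set unique := tfin.foldl (fun u tp => tp.2.foldl (pvStepA tp.1) u) PySem.Dict.empty with huniq
  have hMapEmpty : pvMapU PySem.Dict.empty = PySem.Dict.empty := rfl
  rw [hMapEmpty] at h1
  have hgood : ∀ p ∈ unique.items, p.2.items ≠ [] ∧ p.2.keys.Nodup := by
    intro p hp
    exact hInv.2 p.1 p.2 (PySem.Dict.get?_of_mem_items unique (by simpa using hp) hInv.1)
  have h2 := pv_phase2 unique.items PySem.Dict.empty (by simpa [PySem.Dict.keys] using hInv.1) hgood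
    (by intro p _; simp [PySem.Dict.contains, PySem.Dict.empty])
  simp only [h2]
  rw [h1]
  rfl
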